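-- pv_equiv track=rewrite | github.com/Celelibi/urssaf-declare | urssaf.py | enclosing_opening_brace
-- ===== SOURCE A (Python) =====
-- def enclosing_opening_brace(s, start):
--     if start is None:
--         start = len(s) - 1
--
--     pos = start
--     cnt = int(s[start] == "{")
--     while pos >= 0:
--         c = s[pos]
--         if c == "}":
--             cnt += 1
--         elif c == "{":
--             if cnt == 0:
--                 return pos
--             cnt -= 1
--
--         pos -= 1
--
--     raise ValueError("No matching opening braces")
-- ===== SOURCE B (Python) =====
-- def enclosing_opening_brace(s, start):
--     if start is None:
--         start = len(s) - 1
--     stack = []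
--     for pos in range(start + 1):
--         c = s[pos]
--         if c == "{":
--             stack.append(pos)
--         elif c == "}" and stack:
--             stack.pop()
--     if stack and stack[-1] == start:
--         stack.pop()
--     if not stack:
--         raise ValueError("No matching opening braces")
--     return stack[-1]
-- ===== Notes on version B (the rewrite author's own statement) =====
-- stated objective: alternative
-- what changed: Replaced A's backward scan with an unmatched-close counter by a single forward left-to-right pass that maintains a stack of positions of unmatched opening braces and returns its top (after discarding the brace at start itself).
import Mathlib
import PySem

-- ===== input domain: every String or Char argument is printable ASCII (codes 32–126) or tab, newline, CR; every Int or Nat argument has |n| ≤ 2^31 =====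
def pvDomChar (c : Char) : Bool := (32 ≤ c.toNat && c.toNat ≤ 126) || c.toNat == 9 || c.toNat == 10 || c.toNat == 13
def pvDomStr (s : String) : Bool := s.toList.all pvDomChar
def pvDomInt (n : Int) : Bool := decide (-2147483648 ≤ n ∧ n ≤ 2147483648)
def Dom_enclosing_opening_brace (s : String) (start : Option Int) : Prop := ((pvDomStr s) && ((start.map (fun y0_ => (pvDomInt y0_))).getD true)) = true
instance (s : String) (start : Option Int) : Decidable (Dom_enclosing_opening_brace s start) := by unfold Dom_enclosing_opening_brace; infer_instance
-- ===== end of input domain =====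

-- B replaces A's backward counter scan by a forward stack-based bracket matcher (same O(n) cost);
-- equivalence is about the return value on inputs where Python A returns (Pre_ below).

-- ===== PORT A =====
-- the while loop: fuel n+1 means pos = n; cnt is the running count of unmatched '}' seen so far.
def pvAGo (cs : List Char) : Nat → Int → Option Int
  | 0, _ => none                                  -- pos < 0: fell through → ValueError
  | n + 1, cnt =>
    match PySem.List.pyGet? cs (n : Int) with
    | none => none                                 -- IndexError (unreachable under Pre_)
    | some c =>
      if c = '}' then pvAGo cs n (cnt + 1)
      else if c = '{' then
        if cnt = 0 then some (n : Int) else pvAGo cs n (cnt - 1)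
      else pvAGo cs n cnt

def enclosing_opening_brace (s : String) (start : Option Int) : Int :=
  let cs := s.toList
  let st : Int := match start with | none => (cs.length : Int) - 1 | some v => v
  match PySem.List.pyGet? cs st with
  | none => 0                                      -- IndexError on s[start] (outside Pre_)
  | some c0 =>
    let cnt : Int := if c0 = '{' then 1 else 0
    if 0 ≤ st then
      match pvAGo cs (st.toNat + 1) cnt with
      | some p => p
      | none => 0                                  -- ValueError (outside Pre_)
    else 0                                         -- loop never entered → ValueError (outside Pre_)

-- ===== PORT B =====
-- one forward step of the stack matcher (stack head = Python stack[-1])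
def pvBStep (cs : List Char) (stk : List Int) (pos : Int) : List Int :=
  match PySem.List.pyGet? cs pos with
  | none => stk                                    -- IndexError (unreachable under Pre_)
  | some c =>
    if c = '{' then pos :: stk
    else if c = '}' then stk.tail                  -- 'and stack: stack.pop()' (tail [] = [])
    else stk

def enclosing_opening_brace_alt (s : String) (start : Option Int) : Int :=
  let cs := s.toList
  let st : Int := match start with | none => (cs.length : Int) - 1 | some v => v
  let stack := (PySem.List.pyRange 0 (st + 1) 1).foldl (pvBStep cs) []
  let stack := match stack with
    | p :: rest => if p = st then rest else p :: rest   -- if stack and stack[-1] == start: pop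
    | [] => []
  match stack with
  | p :: _ => p
  | [] => 0                                        -- ValueError (outside Pre_)

-- ===== PRECONDITION & SPEC =====
-- Pre_ = exactly the inputs on which Python A returns: the effective start is a valid
-- non-negative index, and some opening brace at p < m (m = scanned region, excluding the
-- brace at start itself) is unmatched, i.e. its following region is brace-balanced.
def Pre_enclosing_opening_brace (s : String) (start : Option Int) : Prop :=
  let cs := s.toList
  let eff : Int := match start with | none => (cs.length : Int) - 1 | some v => v
  0 ≤ eff ∧ eff < cs.length ∧
    (let n := eff.toNat
     let m := if cs.getD n ' ' = '{' then n else n + 1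
     ∃ p < m, cs.getD p ' ' = '{' ∧
       ((cs.take m).drop (p + 1)).count '}' = ((cs.take m).drop (p + 1)).count '{')
instance (s : String) (start : Option Int) : Decidable (Pre_enclosing_opening_brace s start) := by
  unfold Pre_enclosing_opening_brace; infer_instance

def pvWitness_enclosing_opening_brace : String × Option Int := ("{ab", some 2)

def Spec_enclosing_opening_brace (s : String) (start : Option Int) (out : Int) : Prop := out = enclosing_opening_brace_alt s start
instance (s : String) (start : Option Int) (out : Int) : Decidable (Spec_enclosing_opening_brace s start out) := by unfold Spec_enclosing_opening_brace; infer_instance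

-- ===== CLAIM (what is proved, stated in full; the proofs are below) =====
def Claim_equal_enclosing_opening_brace : Prop := ∀ (s : String) (start : Option Int), Dom_enclosing_opening_brace s start → Pre_enclosing_opening_brace s start → Spec_enclosing_opening_brace s start (enclosing_opening_brace s start)


-- ===== LEMMAS AND PROOFS =====

-- the forward stack matcher over an index-tagged character list (model shared by both sides)
def pvStep (stk : List Int) (x : Int × Char) : List Int :=
  if x.2 = '{' then x.1 :: stk else if x.2 = '}' then stk.tail else stk

def pvStk (l : List (Int × Char)) : List Int := l.foldl pvStep []

-- A's backward counter scan over the reversed tagged list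
def pvBwd : List (Int × Char) → Int → Option Int
  | [], _ => none
  | (i, c) :: t, cnt =>
    if c = '}' then pvBwd t (cnt + 1)
    else if c = '{' then (if cnt = 0 then some i else pvBwd t (cnt - 1))
    else pvBwd t cnt

def pvTag : Int → List Char → List (Int × Char)
  | _, [] => []
  | i, c :: l => (i, c) :: pvTag (i + 1) l

lemma pvTag_append (l : List Char) : ∀ (i : Int) (c : Char),
    pvTag i (l ++ [c]) = pvTag i l ++ [(i + l.length, c)] := by
  induction l with
  | nil => intro i c; simp [pvTag]
  | cons a l ih =>
    intro i c
    simp only [List.cons_append, pvTag, ih, List.length_cons]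
    have : i + 1 + (l.length : Int) = i + ((l.length + 1 : Nat) : Int) := by push_cast; ring
    rw [this]

lemma pvTag_mem : ∀ (l : List Char) (i p : Int) (c : Char), (p, c) ∈ pvTag i l →
    ∃ k : Nat, k < l.length ∧ p = i + k ∧ l[k]? = some c := by
  intro l
  induction l with
  | nil => intro i p c h; simp [pvTag] at h
  | cons a l ih =>
    intro i p c h
    simp only [pvTag, List.mem_cons] at h
    rcases h with h | h
    · obtain ⟨rfl, rfl⟩ := Prod.ext_iff.mp h
      exact ⟨0, by simp, by simp, by simp⟩
    · obtain ⟨k, hk, hp, hg⟩ := ih (i + 1) p c h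
      exact ⟨k + 1, by simpa using hk, by omega, by simpa using hg⟩

lemma pvStk_mem : ∀ (l : List (Int × Char)) (st : List Int) (q : Int),
    q ∈ l.foldl pvStep st → q ∈ st ∨ (q, '{') ∈ l := by
  intro l
  induction l with
  | nil => intro st q h; simp at h; exact Or.inl h
  | cons x l ih =>
    intro st q h
    rcases ih (pvStep st x) q h with h' | h'
    · obtain ⟨i, c⟩ := x
      unfold pvStep at h'
      split_ifs at h' with h1 h2
      · rcases List.mem_cons.mp h' with h'' | hm
        · exact Or.inr (List.mem_cons.mpr (Or.inl (by simp at h1 h'' ⊢; exact ⟨h'', h1.symm⟩)))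
        · exact Or.inl hm
      · exact Or.inl (List.mem_of_mem_tail h')
      · exact Or.inl h'
    · exact Or.inr (List.mem_cons_of_mem _ h')

-- core: the backward counter scan reads off the cnt-th element of the forward stack
lemma pvBwd_eq : ∀ (t : List (Int × Char)) (cnt : Int), 0 ≤ cnt →
    pvBwd t cnt = (pvStk t.reverse)[cnt.toNat]? := by
  intro t
  induction t with
  | nil => intro cnt _; simp [pvBwd, pvStk]
  | cons x t ih =>
    intro cnt hcnt
    obtain ⟨i, c⟩ := x
    have hstk : pvStk ((i, c) :: t).reverse
        = if c = '{' then i :: pvStk t.reverse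
          else if c = '}' then (pvStk t.reverse).tail else pvStk t.reverse := by
      simp [pvStk, List.reverse_cons, List.foldl_append, pvStep]
    rw [hstk]
    simp only [pvBwd]
    by_cases h1 : c = '}'
    · have h2 : ¬ c = '{' := by subst h1; decide
      rw [if_pos h1, if_neg h2, if_pos h1, ih (cnt + 1) (by omega)]
      have hc : (cnt + 1).toNat = cnt.toNat + 1 := by omega
      rw [hc, List.getElem?_tail]
    · by_cases h3 : c = '{'
      · rw [if_neg h1, if_pos h3, if_pos h3]
        by_cases h4 : cnt = 0
        · subst h4; simp
        · rw [if_neg h4, ih (cnt - 1) (by omega)]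
          have hc : cnt.toNat = (cnt - 1).toNat + 1 := by omega
          rw [hc, List.getElem?_cons_succ]
      · rw [if_neg h1, if_neg h3, if_neg h3, if_neg h1, ih cnt hcnt]

-- A's loop is the backward scan over the reversed tagged prefix
lemma pvAGo_eq (cs : List Char) : ∀ (m : Nat), m ≤ cs.length → ∀ (cnt : Int),
    pvAGo cs m cnt = pvBwd (pvTag 0 (cs.take m)).reverse cnt := by
  intro m
  induction m with
  | zero => intro _ cnt; simp [pvAGo, pvTag, pvBwd]
  | succ n ih =>
    intro hm cnt
    have hn : n < cs.length := by omega
    have hget : PySem.List.pyGet? cs (n : Int) = some cs[n] := by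
      rw [PySem.List.pyGet?_natCast]; simp [hn]
    have htake : cs.take (n + 1) = cs.take n ++ [cs[n]] := by
      rw [List.take_add_one]; simp [hn]
    have hrev : (pvTag 0 (cs.take (n + 1))).reverse
        = ((n : Int), cs[n]) :: (pvTag 0 (cs.take n)).reverse := by
      rw [htake, pvTag_append]
      simp [List.length_take, Nat.min_eq_left (le_of_lt hn)]
    rw [hrev]
    simp only [pvAGo, pvBwd, hget]
    split_ifs with h1 h3 h4
    · exact ih (by omega) (cnt + 1)
    · rfl
    · exact ih (by omega) (cnt - 1)
    · exact ih (by omega) cnt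

-- B's foldl over range(start+1) is the stack matcher over the tagged prefix
lemma pvFold_eq (cs : List Char) : ∀ (m : Nat), m ≤ cs.length →
    (PySem.List.pyRange 0 (m : Int) 1).foldl (pvBStep cs) [] = pvStk (pvTag 0 (cs.take m)) := by
  intro m
  induction m with
  | zero => simp [pvTag, pvStk]
  | succ n ih =>
    intro hm
    have hn : n < cs.length := by omega
    have hget : PySem.List.pyGet? cs (n : Int) = some cs[n] := by
      rw [PySem.List.pyGet?_natCast]; simp [hn]
    have hr : PySem.List.pyRange 0 ((n : Int) + 1) 1
        = PySem.List.pyRange 0 (n : Int) 1 ++ [(n : Int)] := by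
      exact PySem.List.pyRange_one_succ_right (by exact_mod_cast Nat.zero_le n)
    have htake : cs.take (n + 1) = cs.take n ++ [cs[n]] := by
      rw [List.take_add_one]; simp [hn]
    have hcast : ((n + 1 : Nat) : Int) = (n : Int) + 1 := by push_cast; ring
    have hlen : ((0 : Int) + ((cs.take n).length : Int), cs[n]) = ((n : Int), cs[n]) := by
      simp [List.length_take, Nat.min_eq_left (le_of_lt hn)]
    rw [hcast, hr, List.foldl_append, ih (by omega), htake, pvTag_append, hlen]
    simp only [pvStk, List.foldl_append, List.foldl_cons, List.foldl_nil]
    unfold pvBStep pvStep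
    rw [hget]

-- if the scanned region does not end with '{', no stack entry can be the start position
lemma pvStk_ne_start (cs : List Char) (n : Nat) (hn : n < cs.length) (hne : cs[n] ≠ '{')
    (p : Int) (hp : p ∈ pvStk (pvTag 0 (cs.take (n + 1)))) : p ≠ (n : Int) := by
  rcases pvStk_mem _ _ _ hp with h | h
  · simp at h
  · obtain ⟨k, hk, hpk, hg⟩ := pvTag_mem _ _ _ _ h
    intro hcontra
    have hkn : k = n := by omega
    subst hkn
    rw [List.getElem?_take_of_lt (by omega), List.getElem?_eq_getElem hn] at hg
    exact hne (Option.some.inj hg)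

-- the two ports agree for any in-range non-negative start position
lemma pvMain (cs : List Char) (st : Int) (h0 : 0 ≤ st) (h1 : st < (cs.length : Int)) :
    (match PySem.List.pyGet? cs st with
     | none => (0 : Int)
     | some c0 =>
       if 0 ≤ st then
         match pvAGo cs (st.toNat + 1) (if c0 = '{' then 1 else 0) with
         | some p => p
         | none => 0
       else 0)
    = (match (match (PySem.List.pyRange 0 (st + 1) 1).foldl (pvBStep cs) [] with
              | p :: rest => if p = st then rest else p :: rest
              | [] => []) with
       | p :: _ => p
       | [] => (0 : Int)) := by
  set n := st.toNat with hn
  have hst : st = (n : Int) := by omega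
  have hnlen : n < cs.length := by omega
  have hget : PySem.List.pyGet? cs st = some cs[n] := by
    rw [hst, PySem.List.pyGet?_natCast]; simp [hnlen]
  have hfold : (PySem.List.pyRange 0 (st + 1) 1).foldl (pvBStep cs) []
      = pvStk (pvTag 0 (cs.take (n + 1))) := by
    have h : st + 1 = ((n + 1 : Nat) : Int) := by omega
    rw [h]; exact pvFold_eq cs (n + 1) (by omega)
  have hago : ∀ cnt : Int, 0 ≤ cnt →
      pvAGo cs (n + 1) cnt = (pvStk (pvTag 0 (cs.take (n + 1))))[cnt.toNat]? := by
    intro cnt hc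
    rw [pvAGo_eq cs (n + 1) (by omega) cnt, pvBwd_eq _ cnt hc, List.reverse_reverse]
  have htake : cs.take (n + 1) = cs.take n ++ [cs[n]] := by
    rw [List.take_add_one]; simp [hnlen]
  rw [hget, hfold]
  dsimp only
  rw [if_pos h0]
  by_cases hbrace : cs[n] = '{'
  · -- start char is '{': A starts with cnt = 1; B pops the top (= start) off the stack
    have hS : pvStk (pvTag 0 (cs.take (n + 1))) = (n : Int) :: pvStk (pvTag 0 (cs.take n)) := by
      rw [htake, pvTag_append]
      have hlen : ((0 : Int) + ((cs.take n).length : Int), cs[n]) = ((n : Int), cs[n]) := by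
        simp [List.length_take, Nat.min_eq_left (le_of_lt hnlen)]
      rw [hlen]
      simp only [pvStk, List.foldl_append, List.foldl_cons, List.foldl_nil]
      unfold pvStep
      simp [hbrace]
    rw [if_pos hbrace, hago 1 (by norm_num), hS]
    simp only [Int.toNat_one, List.getElem?_cons_succ, if_pos hst.symm]
    cases pvStk (pvTag 0 (cs.take n)) with
    | nil => simp
    | cons p rest => simp
  · -- start char is not '{': the stack top (if any) differs from start
    rw [if_neg hbrace, hago 0 (by norm_num)]
    simp only [Int.toNat_zero]
    cases hS : pvStk (pvTag 0 (cs.take (n + 1))) with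
    | nil => simp
    | cons p rest =>
      have hpne : p ≠ st := by
        rw [hst]
        exact pvStk_ne_start cs n hnlen hbrace p (by rw [hS]; exact List.mem_cons_self ..)
      simp [hpne]

-- ===== VERDICT (by name: the statement is the Claim_ definition above) =====
theorem enclosing_opening_brace_spec : Claim_equal_enclosing_opening_brace := by
  intro s start _ hpre
  unfold Spec_enclosing_opening_brace enclosing_opening_brace enclosing_opening_brace_alt
  unfold Pre_enclosing_opening_brace at hpre
  cases start with
  | none =>
    obtain ⟨h0, h1, _⟩ := hpre
    exact pvMain s.toList ((s.toList.length : Int) - 1) h0 h1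
  | some v =>
    obtain ⟨h0, h1, _⟩ := hpre
    exact pvMain s.toList v h0 h1
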